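-- pv_equiv track=rewrite | github.com/langgenius/dify | api/tests/unit_tests/models/test_data_flow_integrity.py | _ordinal_keys_from_agent_service
-- ===== SOURCE A (Python) =====
-- def _ordinal_keys_from_agent_service(tools: list[str]) -> list[str]:
--     """
--     Reproduce the ordinal key algorithm from agent_service.py get_agent_logs.
--     This MUST match the algorithm in model.py properties.
--     """
--     keys = []
--     name_count: dict[str, int] = {}
--     for tool in tools:
--         tool_name = tool
--         name_count[tool_name] = name_count.get(tool_name, 0) + 1
--         ordinal_key = tool_name if name_count[tool_name] == 1 else f"{tool_name}__{name_count[tool_name]}"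
--         keys.append(ordinal_key)
--     return keys
-- ===== SOURCE B (Python) =====
-- def _ordinal_keys_from_agent_service(tools: list[str]) -> list[str]:
--     # Phase 1: group positions by tool name (one pass over enumerate).
--     positions: dict[str, list[int]] = {}
--     for i, t in enumerate(tools):
--         positions.setdefault(t, []).append(i)
--     # Phase 2: allocate the output and fill it group by group,
--     # ranking each name's occurrences by their order of appearance.
--     keys = [""] * len(tools)
--     for name, idxs in positions.items():
--         for rank, pos in enumerate(idxs, start=1):
--             keys[pos] = name if rank == 1 else f"{name}__{rank}"
--     return keys
-- ===== Notes on version B (the rewrite author's own statement) =====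
-- stated objective: alternative
-- what changed: Replaces A's single running name->count scan with a two-phase group-by: first build a dict mapping each name to the list of indices where it occurs, then allocate the output and fill keys[pos] per group using the 1-based rank within that name's index list.
import Mathlib
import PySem

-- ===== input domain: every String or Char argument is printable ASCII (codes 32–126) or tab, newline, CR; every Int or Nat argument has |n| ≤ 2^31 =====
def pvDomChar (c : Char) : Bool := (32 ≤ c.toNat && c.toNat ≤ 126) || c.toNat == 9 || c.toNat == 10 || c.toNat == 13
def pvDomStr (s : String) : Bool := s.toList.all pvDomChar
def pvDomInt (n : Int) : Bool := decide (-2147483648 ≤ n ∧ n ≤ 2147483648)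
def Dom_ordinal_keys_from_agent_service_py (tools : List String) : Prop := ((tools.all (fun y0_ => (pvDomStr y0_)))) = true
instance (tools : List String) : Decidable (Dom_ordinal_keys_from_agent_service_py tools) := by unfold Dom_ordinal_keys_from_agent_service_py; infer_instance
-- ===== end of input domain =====

-- B replaces A's single running name->count scan with a two-phase group-by-name fill
-- (dict name -> index list, then keys[pos] written per group by rank); return values proved equal.

-- ===== PORT A =====
-- literal transliteration of A's loop: state = (keys, name_count)
def ordinal_keys_from_agent_service_py (tools : List String) : List String :=
  (tools.foldl
    (fun (st : List String × PySem.Dict String Int) tool =>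
      let c := st.2.getD tool 0 + 1
      let nc := st.2.insert tool c
      let ordinal_key := if c = 1 then tool else tool ++ "__" ++ PySem.Int.toStr c
      (st.1 ++ [ordinal_key], nc))
    ([], PySem.Dict.empty)).1

-- ===== PORT B =====
-- literal transliteration of Source B: phase 1 groups indices by name
-- (positions.setdefault(t, []).append(i) is d.modify t [] (· ++ [i])),
-- phase 2 fills the preallocated output group by group.
def ordinal_keys_from_agent_service_py_alt (tools : List String) : List String :=
  let positions : PySem.Dict String (List Int) :=
    (PySem.List.enumerate tools 0).foldl
      (fun d p => d.modify p.2 [] (fun l => l ++ [p.1])) PySem.Dict.empty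
  positions.items.foldl
    (fun keys g =>
      (PySem.List.enumerate g.2 1).foldl
        (fun ks q =>
          PySem.List.pySetD ks q.2
            (if q.1 = 1 then g.1 else g.1 ++ "__" ++ PySem.Int.toStr q.1))
        keys)
    (List.replicate tools.length "")

-- ===== PRECONDITION & SPEC =====
def Spec_ordinal_keys_from_agent_service_py (tools : List String) (out : List String) : Prop := out = ordinal_keys_from_agent_service_py_alt tools
instance (tools : List String) (out : List String) : Decidable (Spec_ordinal_keys_from_agent_service_py tools out) := by unfold Spec_ordinal_keys_from_agent_service_py; infer_instance

-- ===== CLAIM (what is proved, stated in full; the proofs are below) =====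
def Claim_equal_ordinal_keys_from_agent_service_py : Prop := ∀ (tools : List String), Dom_ordinal_keys_from_agent_service_py tools → Spec_ordinal_keys_from_agent_service_py tools (ordinal_keys_from_agent_service_py tools)

-- ===== LEMMAS AND PROOFS =====

-- the key both programs produce for position i of T
def pvKey (T : List String) (i : Nat) : String :=
  let t := T.getD i ""
  let c := (T.take (i + 1)).count t
  if c = 1 then t else t ++ "__" ++ PySem.Int.toStr (c : Int)

-- positions (from offset k) at which `name` occurs in ts
def pvOcc (ts : List String) (name : String) (k : Nat) : List Nat :=
  match ts with
  | [] => []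
  | t :: r => if t = name then k :: pvOcc r name (k + 1) else pvOcc r name (k + 1)

theorem pvOcc_enum (name : String) :
    ∀ (ts : List String) (k : Nat),
      ((PySem.List.enumerate ts (k : Int)).filter (fun p => p.2 == name)).map (·.1)
        = (pvOcc ts name k).map (fun j => (j : Int)) := by
  intro ts
  induction ts with
  | nil => intro k; simp [PySem.List.enumerate_nil, pvOcc]
  | cons t r ih =>
    intro k
    rw [PySem.List.enumerate_cons, List.filter_cons]
    have hk : (k : Int) + 1 = ((k + 1 : Nat) : Int) := by push_cast; ring
    rw [hk]
    by_cases h : t = name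
    · simp only [pvOcc, h, beq_self_eq_true, if_true, List.map_cons, ih (k + 1)]
      simp
    · have hb : (t == name) = false := by simp [h]
      simp only [pvOcc, if_neg h, hb, Bool.false_eq_true, if_false, ih (k + 1)]

theorem pvA_loop :
    ∀ (rest pre acc : List String) (d : PySem.Dict String Int),
    (∀ s, d.getD s 0 = (pre.count s : Int)) →
    (rest.foldl
      (fun (st : List String × PySem.Dict String Int) tool =>
        let c := st.2.getD tool 0 + 1
        let nc := st.2.insert tool c
        let ordinal_key := if c = 1 then tool else tool ++ "__" ++ PySem.Int.toStr c
        (st.1 ++ [ordinal_key], nc)) (acc, d)).1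
      = acc ++ (List.range rest.length).map (fun j => pvKey (pre ++ rest) (pre.length + j)) := by
  intro rest
  induction rest with
  | nil => intro pre acc d _; simp
  | cons t r ih =>
    intro pre acc d hd
    simp only [List.foldl_cons, List.length_cons]
    have hstep : ∀ s, (d.insert t (d.getD t 0 + 1)).getD s 0 = ((pre ++ [t]).count s : Int) := by
      intro s
      rw [PySem.Dict.getD_insert]
      by_cases hst : s = t
      · subst hst; simp [hd s, List.count_append]
      · simp [hst, hd s, List.count_append, Ne.symm hst]
    have hA := ih (pre ++ [t])
      (acc ++ [if d.getD t 0 + 1 = 1 then t else t ++ "__" ++ PySem.Int.toStr (d.getD t 0 + 1)])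
      (d.insert t (d.getD t 0 + 1)) hstep
    simp only at hA
    rw [hA]
    -- head key value
    have hget : (pre ++ t :: r).getD pre.length "" = t := by
      simp [List.getD_eq_getElem?_getD]
    have htake : (pre ++ t :: r).take (pre.length + 1) = pre ++ [t] := by
      rw [List.take_append]
      simp
    have hhead : pvKey (pre ++ t :: r) pre.length
        = (if d.getD t 0 + 1 = 1 then t else t ++ "__" ++ PySem.Int.toStr (d.getD t 0 + 1)) := by
      unfold pvKey
      simp only [hget, htake, hd t]
      have hc : ((pre ++ [t]).count t) = pre.count t + 1 := by
        simp [List.count_append]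
      rw [hc]
      have : ((pre.count t : Int) + 1 = 1) ↔ (pre.count t + 1 = 1) := by omega
      by_cases h1 : pre.count t + 1 = 1
      · simp [h1, this.mpr h1]
      · have h2 : ¬ ((pre.count t : Int) + 1 = 1) := fun hh => h1 (this.mp hh)
        rw [if_neg h1, if_neg h2]
        congr 1
    rw [List.range_succ_eq_map, List.map_cons, Nat.add_zero, hhead,
      ← List.append_cons, List.map_map]
    congr 2
    apply List.map_congr_left
    intro j _
    simp only [Function.comp_apply, List.append_assoc, List.singleton_append,
      List.length_append, List.length_singleton, Nat.succ_eq_add_one]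
    congr 1
    omega

-- inner fill loop of B, over the occurrence list of one name
theorem pvSetLoop (T : List String) (name : String) :
    ∀ (ts : List String) (k : Nat) (ks : List String),
      T.drop k = ts → ks.length = T.length →
      ((PySem.List.enumerate ((pvOcc ts name k).map (fun j => (j : Int)))
          ((((T.take k).count name : Nat) : Int) + 1)).foldl
        (fun ks q =>
          PySem.List.pySetD ks q.2
            (if q.1 = 1 then name else name ++ "__" ++ PySem.Int.toStr q.1)) ks).length
        = T.length
      ∧ ∀ i, i < T.length →
        ((PySem.List.enumerate ((pvOcc ts name k).map (fun j => (j : Int)))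
            ((((T.take k).count name : Nat) : Int) + 1)).foldl
          (fun ks q =>
            PySem.List.pySetD ks q.2
              (if q.1 = 1 then name else name ++ "__" ++ PySem.Int.toStr q.1)) ks).getD i ""
          = if k ≤ i ∧ T.getD i "" = name then pvKey T i else ks.getD i "" := by
  intro ts
  induction ts with
  | nil =>
    intro k ks hdrop hlen
    have hk : T.length ≤ k := by
      by_contra h
      have := List.drop_eq_nil_iff.mp hdrop
      omega
    constructor
    · simpa [pvOcc, PySem.List.enumerate_nil] using hlen
    · intro i hi
      have : ¬ (k ≤ i ∧ T.getD i "" = name) := by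
        rintro ⟨h1, _⟩; omega
      have e : (pvOcc [] name k).map (fun j => (j : Int)) = [] := rfl
      rw [e, PySem.List.enumerate_nil, List.foldl_nil, if_neg this]
  | cons t r ih =>
    intro k ks hdrop hlen
    have hk : k < T.length := by
      have := congrArg List.length hdrop
      simp only [List.length_drop, List.length_cons] at this
      omega
    have hTk? : T[k]? = some t := by
      rw [show k = k + 0 from rfl, ← List.getElem?_drop, hdrop]
      rfl
    have hgetk : T.getD k "" = t := by
      rw [List.getD_eq_getElem?_getD, hTk?]
      rfl
    have hdrop' : T.drop (k + 1) = r := by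
      have h2 := congrArg (List.drop 1) hdrop
      rw [List.drop_drop] at h2
      simpa using h2
    have htake' : T.take (k + 1) = T.take k ++ [t] := by
      rw [List.take_add_one, hTk?]
      rfl
    by_cases ht : t = name
    · -- occurrence at k: write it, continue with rank+1
      subst ht
      have em : (pvOcc (t :: r) t k).map (fun j => (j : Int))
          = ((k : Nat) : Int) :: (pvOcc r t (k + 1)).map (fun j => (j : Int)) := by
        rw [pvOcc, if_pos rfl]
        rfl
      rw [em, PySem.List.enumerate_cons, List.foldl_cons]
      have hcount : (T.take (k + 1)).count t = (T.take k).count t + 1 := by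
        simp [htake', List.count_append]
      have hs1 : ((((T.take k).count t : Nat) : Int) + 1) + 1
          = ((((T.take (k + 1)).count t : Nat) : Int) + 1) := by
        rw [hcount]; push_cast; ring
      set v := (if (((((T.take k).count t : Nat) : Int)) + 1) = 1 then t
        else t ++ "__" ++ PySem.Int.toStr ((((T.take k).count t : Nat) : Int) + 1)) with hv
      have hset : PySem.List.pySetD ks (k : Int) v = ks.set k v :=
        PySem.List.pySetD_natCast ks k v
      have hlen' : (ks.set k v).length = T.length := by simp [hlen]
      have hih := ih (k + 1) (ks.set k v) hdrop' hlen'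
      rw [hs1]
      simp only [hset]
      refine ⟨hih.1, ?_⟩
      intro i hi
      rw [hih.2 i hi]
      by_cases hik : i = k
      · subst hik
        have : ¬ (i + 1 ≤ i) := by omega
        rw [if_neg (by rintro ⟨h1, _⟩; omega), if_pos ⟨Nat.le_refl i, hgetk⟩]
        -- pvKey T i equals the written value v
        have hgetset : (ks.set i v).getD i "" = v := by
          rw [List.getD_eq_getElem _ "" (by omega)]
          simp
        rw [hgetset, hv]
        unfold pvKey
        simp only [hgetk, hcount]
        by_cases h1 : (T.take i).count t + 1 = 1
        · rw [if_pos h1, if_pos (by exact_mod_cast (by omega : (((T.take i).count t : Int)) + 1 = 1))]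
        · rw [if_neg h1, if_neg (by intro hh; apply h1; exact_mod_cast (by omega : ((T.take i).count t + 1 : Nat) = 1))]
          congr 1
      · have hgetset : (ks.set k v).getD i "" = ks.getD i "" := by
          simp [List.getD_eq_getElem?_getD, List.getElem?_set_ne (by omega : k ≠ i)]
        rw [hgetset]
        by_cases hc1 : k + 1 ≤ i ∧ T.getD i "" = t
        · rw [if_pos hc1, if_pos ⟨by omega, hc1.2⟩]
        · rw [if_neg hc1, if_neg (by rintro ⟨h1, h2⟩; exact hc1 ⟨by omega, h2⟩)]
    · -- no occurrence at k
      have em : (pvOcc (t :: r) name k).map (fun j => (j : Int))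
          = (pvOcc r name (k + 1)).map (fun j => (j : Int)) := by
        rw [pvOcc, if_neg ht]
      rw [em]
      have hcount : (T.take (k + 1)).count name = (T.take k).count name := by
        simp [htake', List.count_append, ht]
      have hih := ih (k + 1) ks hdrop' hlen
      rw [hcount] at hih
      refine ⟨hih.1, ?_⟩
      intro i hi
      rw [hih.2 i hi]
      by_cases hik : i = k
      · subst hik
        rw [if_neg (by rintro ⟨h1, _⟩; omega),
          if_neg (by rintro ⟨_, h2⟩; rw [hgetk] at h2; exact ht h2)]
      · by_cases hc1 : k + 1 ≤ i ∧ T.getD i "" = name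
        · rw [if_pos hc1, if_pos ⟨by omega, hc1.2⟩]
        · rw [if_neg hc1, if_neg (by rintro ⟨h1, h2⟩; exact hc1 ⟨by omega, h2⟩)]

-- outer loop of B's phase 2, over the list of names with values V
theorem pvFold2 (T : List String) (V : String → List Int) :
    ∀ (ns : List String) (ks : List String),
      ks.length = T.length →
      (∀ nm ∈ ns, V nm = (pvOcc T nm 0).map (fun j => (j : Int))) →
      (ns.foldl
        (fun keys nm =>
          (PySem.List.enumerate (V nm) 1).foldl
            (fun ks q =>
              PySem.List.pySetD ks q.2
                (if q.1 = 1 then nm else nm ++ "__" ++ PySem.Int.toStr q.1)) keys) ks).length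
        = T.length
      ∧ ∀ i, i < T.length →
        (ns.foldl
          (fun keys nm =>
            (PySem.List.enumerate (V nm) 1).foldl
              (fun ks q =>
                PySem.List.pySetD ks q.2
                  (if q.1 = 1 then nm else nm ++ "__" ++ PySem.Int.toStr q.1)) keys) ks).getD i ""
          = if T.getD i "" ∈ ns then pvKey T i else ks.getD i "" := by
  intro ns
  induction ns with
  | nil =>
    intro ks hlen _
    refine ⟨hlen, ?_⟩
    intro i hi
    simp
  | cons nm rest ih =>
    intro ks hlen hV
    simp only [List.foldl_cons]
    have hnm := hV nm (List.mem_cons_self)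
    have hloop := pvSetLoop T nm T 0 ks rfl hlen
    have hs : ((((T.take 0).count nm : Nat) : Int) + 1) = 1 := by simp
    rw [hs, ← hnm] at hloop
    have hih := ih _ hloop.1 (fun x hx => hV x (List.mem_cons_of_mem nm hx))
    refine ⟨hih.1, ?_⟩
    intro i hi
    rw [hih.2 i hi]
    by_cases hmem : T.getD i "" ∈ rest
    · rw [if_pos hmem, if_pos (List.mem_cons_of_mem nm hmem)]
    · rw [if_neg hmem, hloop.2 i hi]
      by_cases heq : T.getD i "" = nm
      · rw [if_pos ⟨Nat.zero_le i, heq⟩, if_pos (by rw [heq]; exact List.mem_cons_self)]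
      · rw [if_neg (by rintro ⟨_, h2⟩; exact heq h2),
          if_neg (by intro h; rcases List.mem_cons.mp h with h | h; exact heq h; exact hmem h)]

theorem pvB_eq (T : List String) :
    ordinal_keys_from_agent_service_py_alt T = (List.range T.length).map (fun j => pvKey T j) := by
  simp only [ordinal_keys_from_agent_service_py_alt]
  set positions : PySem.Dict String (List Int) :=
    (PySem.List.enumerate T 0).foldl
      (fun d p => d.modify p.2 [] (fun l => l ++ [p.1])) PySem.Dict.empty with hpos
  have hnodup : positions.keys.Nodup := by
    rw [hpos]
    exact PySem.Dict.nodup_keys_foldl_modify_key (PySem.List.enumerate T 0)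
      (fun p => p.2) [] (fun d p l => l ++ [p.1]) PySem.Dict.empty
      (by simp)
  have hkeys : positions.keys = PySem.Set.ofList T := by
    rw [hpos]
    rw [PySem.Dict.keys_foldl_modify_key]
    simp [PySem.Dict.keys_empty, PySem.Set.update_nil_left, PySem.List.map_snd_enumerate]
  have hgetD : ∀ nm, positions.getD nm [] = (pvOcc T nm 0).map (fun j => (j : Int)) := by
    intro nm
    rw [hpos]
    have hfm : (PySem.List.enumerate T 0).foldl
        (fun d p => d.modify p.2 [] (fun l => l ++ [p.1])) PySem.Dict.empty
        = ((PySem.List.enumerate T 0).map (fun p => (p.2, p.1))).foldl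
          (fun d p => d.modify p.1 [] (fun l => l ++ [p.2])) PySem.Dict.empty := by
      rw [List.foldl_map]
    rw [hfm, PySem.Dict.getD_foldl_modify_append, List.filter_map, List.map_map]
    simpa [Function.comp_def, PySem.Dict.getD_empty] using pvOcc_enum nm T 0
  have hitems : positions.items = positions.keys.map (fun k => (k, positions.getD k [])) :=
    PySem.Dict.items_eq_map_keys positions hnodup []
  rw [hitems, List.foldl_map]
  have hfold := pvFold2 T (fun nm => positions.getD nm []) positions.keys
    (List.replicate T.length "") (by simp) (fun nm _ => hgetD nm)
  apply List.ext_getElem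
  · rw [hfold.1]; simp
  · intro i h1 h2
    have hi : i < T.length := by rw [hfold.1] at h1; exact h1
    have hmem : T.getD i "" ∈ positions.keys := by
      rw [hkeys]
      rw [PySem.Set.mem_ofList]
      rw [List.getD_eq_getElem T "" hi]
      exact List.getElem_mem hi
    have := hfold.2 i hi
    rw [if_pos hmem] at this
    rw [← List.getD_eq_getElem _ "" h1, this]
    simp

-- ===== VERDICT (by name: the statement is the Claim_ definition above) =====
theorem ordinal_keys_from_agent_service_py_spec : Claim_equal_ordinal_keys_from_agent_service_py := by
  intro tools _
  unfold Spec_ordinal_keys_from_agent_service_py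
  rw [pvB_eq]
  unfold ordinal_keys_from_agent_service_py
  have := pvA_loop tools [] [] PySem.Dict.empty
    (by intro s; simp [PySem.Dict.getD_empty])
  simpa using this
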